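-- pv_equiv track=rewrite | github.com/miliar/Code_Jam_Webscraper | solutions_python/solutions_year16_round0_nr3/1075.py | isJamCoin
-- ===== SOURCE A (Python) =====
-- primes = [2, 3, 5, 7, 11, 13, 17]
--
-- def isJamCoin(coin):
--     if coin[0] != 1 or coin[len(coin) - 1] != 1:
--         return None
--     coin = coin[::-1]
--     divisors = []
--     for base in range(2, 11):
--         value = 0
--         exp = 0
--         for digit in coin:
--             if digit == 1:
--                 value += base ** exp
--             exp += 1
--         for prime in primes:
--             if value % prime == 0:
--                 divisors.append(prime)
--                 break
--         else:
--             return None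
--     return divisors
-- ===== SOURCE B (Python) =====
-- primes = [2, 3, 5, 7, 11, 13, 17]
--
-- def isJamCoin(coin):
--     if coin[0] != 1 or coin[-1] != 1:
--         return None
--     divisors = []
--     for base in range(2, 11):
--         # Horner evaluation: one multiply per digit instead of base**exp each digit
--         value = 0
--         for digit in coin:
--             value = value * base + (1 if digit == 1 else 0)
--         prime = next((p for p in primes if value % p == 0), None)
--         if prime is None:
--             return None
--         divisors.append(prime)
--     return divisors
-- ===== Notes on version B (the rewrite author's own statement) =====
-- stated objective: faster
-- what changed: Replaces the per-digit base**exp recomputation over the reversed list with a single left-to-right Horner evaluation (one multiply-add per digit), so each base costs O(len) bigint multiplications instead of O(len^2).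
import Mathlib
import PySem

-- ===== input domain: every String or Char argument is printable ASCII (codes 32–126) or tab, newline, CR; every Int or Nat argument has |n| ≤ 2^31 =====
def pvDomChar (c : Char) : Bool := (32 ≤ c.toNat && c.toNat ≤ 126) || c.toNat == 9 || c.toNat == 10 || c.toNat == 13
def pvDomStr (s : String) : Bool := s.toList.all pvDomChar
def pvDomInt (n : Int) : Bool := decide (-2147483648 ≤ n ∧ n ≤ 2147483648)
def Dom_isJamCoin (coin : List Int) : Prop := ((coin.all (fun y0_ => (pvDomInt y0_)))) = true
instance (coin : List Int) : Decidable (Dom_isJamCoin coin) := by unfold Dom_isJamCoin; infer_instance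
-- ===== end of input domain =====

-- B replaces the per-digit base**exp recomputation over the reversed list with a
-- left-to-right Horner evaluation: O(len) instead of O(len^2) bigint multiplications per base.


-- ===== PORT A =====
def primesA : List Int := [2, 3, 5, 7, 11, 13, 17]

-- 'for prime in primes: if value % prime == 0: … break / else: …'
def findPrimeA : List Int → Int → Option Int
  | [], _ => none
  | p :: ps, v => if PySem.Int.mod v p = 0 then some p else findPrimeA ps v

-- inner digit loop: state (value, exp); 'value += base ** exp; exp += 1'
def valueA (base : Int) (rev : List Int) : Int :=
  (rev.foldl (fun (s : Int × Nat) digit =>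
      (if digit = 1 then s.1 + base ^ s.2 else s.1, s.2 + 1)) (0, 0)).1

-- outer loop over bases, accumulating divisors; early 'return None' on the for-else
def baseLoopA : List Int → List Int → List Int → Option (List Int)
  | [], _, divisors => some divisors
  | base :: rest, rev, divisors =>
      match findPrimeA primesA (valueA base rev) with
      | some p => baseLoopA rest rev (divisors ++ [p])
      | none => none

def isJamCoin (coin : List Int) : Option (List Int) :=
  match PySem.List.pyGet? coin 0, PySem.List.pyGet? coin ((coin.length : Int) - 1) with
  | some c0, some cL =>
      if c0 ≠ 1 ∨ cL ≠ 1 then none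
      else
        match PySem.List.slice? coin none none (-1) with
        | some rev => baseLoopA (PySem.List.pyRange 2 11 1) rev []
        | none => none
  | _, _ => none

-- ===== PORT B =====
-- 'next((p for p in primes if value % p == 0), None)'
def findPrimeB (v : Int) : Option Int :=
  [2, 3, 5, 7, 11, 13, 17].find? (fun p => PySem.Int.mod v p == 0)

-- Horner: 'value = value * base + (1 if digit == 1 else 0)'
def hornerB (base : Int) (coin : List Int) : Int :=
  coin.foldl (fun v digit => v * base + (if digit = 1 then 1 else 0)) 0

def baseLoopB : List Int → List Int → List Int → Option (List Int)
  | [], _, divisors => some divisors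
  | base :: rest, coin, divisors =>
      match findPrimeB (hornerB base coin) with
      | none => none
      | some p => baseLoopB rest coin (divisors ++ [p])

def isJamCoin_alt (coin : List Int) : Option (List Int) :=
  match PySem.List.pyGet? coin 0 with
  | none => none
  | some c0 =>
    match PySem.List.pyGet? coin (-1) with
    | none => none
    | some cL =>
      if c0 ≠ 1 ∨ cL ≠ 1 then none
      else baseLoopB (PySem.List.pyRange 2 11 1) coin []

-- ===== PRECONDITION & SPEC =====
-- A raises IndexError (coin[0]) on the empty list; Pre_ excludes exactly that.
def Pre_isJamCoin (coin : List Int) : Prop := coin ≠ []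
instance (coin : List Int) : Decidable (Pre_isJamCoin coin) := by unfold Pre_isJamCoin; infer_instance
def pvWitness_isJamCoin : List Int := [1, 0, 1, 1]

def Spec_isJamCoin (coin : List Int) (out : Option (List Int)) : Prop := out = isJamCoin_alt coin
instance (coin : List Int) (out : Option (List Int)) : Decidable (Spec_isJamCoin coin out) := by unfold Spec_isJamCoin; infer_instance

-- ===== CLAIM (what is proved, stated in full; the proofs are below) =====
def Claim_equal_isJamCoin : Prop := ∀ (coin : List Int), Dom_isJamCoin coin → Pre_isJamCoin coin → Spec_isJamCoin coin (isJamCoin coin)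

-- ===== LEMMAS AND PROOFS =====

-- mathematical value both loops compute: Σ [rev[i] = 1] * base^i
def powsum (base : Int) : List Int → Int
  | [] => 0
  | d :: t => (if d = 1 then 1 else 0) + base * powsum base t

theorem valueA_fold (base : Int) (rev : List Int) : ∀ (v : Int) (e : Nat),
    (rev.foldl (fun (s : Int × Nat) digit =>
      (if digit = 1 then s.1 + base ^ s.2 else s.1, s.2 + 1)) (v, e)).1
    = v + base ^ e * powsum base rev := by
  induction rev with
  | nil => intro v e; simp [powsum]
  | cons d t ih =>
      intro v e
      simp only [List.foldl, powsum]
      rw [ih]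
      by_cases h : d = 1 <;> simp [h, pow_succ] <;> ring

theorem powsum_append (base : Int) (l : List Int) (d : Int) :
    powsum base (l ++ [d]) = powsum base l + (if d = 1 then 1 else 0) * base ^ l.length := by
  induction l with
  | nil => simp [powsum]
  | cons x t ih => simp [powsum, ih, pow_succ]; by_cases h : d = 1 <;> simp [h] <;> ring

theorem hornerB_fold (base : Int) (l : List Int) : ∀ (v : Int),
    l.foldl (fun v digit => v * base + (if digit = 1 then 1 else 0)) v
    = v * base ^ l.length + powsum base l.reverse := by
  induction l with
  | nil => intro v; simp [powsum]
  | cons d t ih =>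
      intro v
      simp only [List.foldl, List.reverse_cons, List.length_cons]
      rw [ih, powsum_append]
      by_cases h : d = 1 <;> simp [h, pow_succ] <;> ring

theorem value_eq (base : Int) (coin : List Int) :
    valueA base coin.reverse = hornerB base coin := by
  unfold valueA hornerB
  rw [valueA_fold, hornerB_fold]
  simp

theorem findPrimeA_eq_find? (v : Int) : ∀ ps,
    findPrimeA ps v = ps.find? (fun p => PySem.Int.mod v p == 0)
  | [] => rfl
  | p :: ps => by
      rw [findPrimeA, List.find?_cons, findPrimeA_eq_find? v ps]
      by_cases h : PySem.Int.mod v p = 0 <;>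
        rw [show (PySem.Int.mod v p == 0) = decide (PySem.Int.mod v p = 0) from rfl] <;>
        simp [h]

theorem findPrime_eq (v : Int) : findPrimeA primesA v = findPrimeB v := by
  rw [findPrimeA_eq_find?]; rfl

theorem baseLoop_eq (bases : List Int) (coin divisors : List Int) :
    baseLoopA bases coin.reverse divisors = baseLoopB bases coin divisors := by
  induction bases generalizing divisors with
  | nil => rfl
  | cons b rest ih =>
      simp only [baseLoopA, baseLoopB, value_eq, findPrime_eq]
      cases findPrimeB (hornerB b coin) with
      | none => rfl
      | some p => exact ih _

theorem lastIdx_eq (coin : List Int) (h : coin ≠ []) :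
    PySem.List.pyGet? coin ((coin.length : Int) - 1) = PySem.List.pyGet? coin (-1) := by
  have hlen : 0 < coin.length := List.length_pos_iff.mpr h
  have : ((coin.length : Int) - 1) = ((coin.length - 1 : Nat) : Int) := by omega
  rw [this, PySem.List.pyGet?_natCast, PySem.List.pyGet?_neg_one,
    List.getLast?_eq_getElem?]

-- ===== VERDICT (by name: the statement is the Claim_ definition above) =====
theorem isJamCoin_spec : Claim_equal_isJamCoin := by
  intro coin _ hpre
  unfold Spec_isJamCoin isJamCoin isJamCoin_alt
  rw [lastIdx_eq coin hpre, PySem.List.slice?_none_none_neg_one]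
  cases h0 : PySem.List.pyGet? coin 0 with
  | none => rfl
  | some c0 =>
      cases h1 : PySem.List.pyGet? coin (-1) with
      | none => rfl
      | some cL =>
          by_cases hc : c0 ≠ 1 ∨ cL ≠ 1
          · simp [hc]
          · simp only [if_neg hc]
            exact baseLoop_eq _ coin []
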